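-- pv_equiv track=rewrite | github.com/pypi-data/pypi-mirror-399 | packages/ai-drift/ai_drift-0.10.0-py3-none-any.whl/drift/validation/patterns.py | is_regex_pattern
-- ===== SOURCE A (Python) =====
-- def is_regex_pattern(pattern: str) -> bool:
--     """Detect if a pattern is a regex pattern.
--
--     Checks for common regex metacharacters that indicate the pattern
--     is intended as a regular expression rather than a glob pattern.
--
--     -- pattern: Pattern string to check
--
--     Returns True if pattern appears to be regex, False otherwise.
--     """
--     regex_indicators = [
--         r"\(",
--         r"\)",
--         r"\[",
--         r"\]",
--         r"\{",
--         r"\}",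
--         r"\^",
--         r"\$",
--         r"\+",
--         r"\.",
--         r"\|",
--     ]
--     return any(indicator in pattern for indicator in regex_indicators)
-- ===== SOURCE B (Python) =====
-- _METAS = frozenset('()[]{}^$+.|')
--
-- def is_regex_pattern(pattern: str) -> bool:
--     """Single left-to-right scan over adjacent character pairs instead of
--     eleven separate substring searches."""
--     return any(a == '\\' and b in _METAS for a, b in zip(pattern, pattern[1:]))
-- ===== Notes on version B (the rewrite author's own statement) =====
-- stated objective: alternative
-- what changed: Replaced eleven separate two-character substring searches with a single pass over adjacent character pairs that fires when a backslash precedes one of the eleven metacharacters.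
import Mathlib
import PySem

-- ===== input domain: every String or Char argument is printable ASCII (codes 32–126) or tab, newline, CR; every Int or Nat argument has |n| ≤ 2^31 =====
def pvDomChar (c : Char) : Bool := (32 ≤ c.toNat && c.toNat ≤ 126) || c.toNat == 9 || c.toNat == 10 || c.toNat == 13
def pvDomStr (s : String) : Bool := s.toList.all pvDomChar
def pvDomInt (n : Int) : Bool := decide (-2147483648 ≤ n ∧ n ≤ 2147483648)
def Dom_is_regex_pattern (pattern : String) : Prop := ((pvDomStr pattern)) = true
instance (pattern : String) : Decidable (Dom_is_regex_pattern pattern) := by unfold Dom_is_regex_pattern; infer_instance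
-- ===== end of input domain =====

-- B replaces A's eleven substring searches by one scan over adjacent character pairs (objective: alternative).

-- ===== PORT A =====
-- the list `regex_indicators` of eleven two-character strings, then any(indicator in pattern …)
def pvIndicators : List String :=
  ["\\(", "\\)", "\\[", "\\]", "\\{", "\\}", "\\^", "\\$", "\\+", "\\.", "\\|"]

def is_regex_pattern (pattern : String) : Bool :=
  pvIndicators.any (fun indicator => PySem.Str.isIn indicator pattern)

-- ===== PORT B =====
-- the set _METAS of eleven metacharacters
def pvMetas : List Char := ['(', ')', '[', ']', '{', '}', '^', '$', '+', '.', '|']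

-- any(a == '\\' and b in _METAS for a, b in zip(pattern, pattern[1:])) as a scan over adjacent pairs
def pvScan : List Char → Bool
  | c :: d :: rest => (c == '\\' && pvMetas.contains d) || pvScan (d :: rest)
  | _ => false

def is_regex_pattern_alt (pattern : String) : Bool :=
  pvScan pattern.toList

-- ===== PRECONDITION & SPEC =====
def Spec_is_regex_pattern (pattern : String) (out : Bool) : Prop := out = is_regex_pattern_alt pattern
instance (pattern : String) (out : Bool) : Decidable (Spec_is_regex_pattern pattern out) := by unfold Spec_is_regex_pattern; infer_instance

-- ===== CLAIM (what is proved, stated in full; the proofs are below) =====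
def Claim_equal_is_regex_pattern : Prop := ∀ (pattern : String), Dom_is_regex_pattern pattern → Spec_is_regex_pattern pattern (is_regex_pattern pattern)

-- ===== LEMMAS AND PROOFS =====

-- B's scan fires exactly when some ['\\', m] with m a metacharacter is an infix.
theorem pvScan_iff (cs : List Char) :
    pvScan cs = true ↔ ∃ m ∈ pvMetas, ['\\', m] <:+: cs := by
  induction cs with
  | nil =>
      simp [pvScan]
  | cons c tail ih =>
      cases tail with
      | nil =>
          simp only [pvScan, Bool.false_eq_true, false_iff]
          rintro ⟨m, -, h⟩
          have := h.length_le
          simp at this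
      | cons d rest =>
          simp only [pvScan, Bool.or_eq_true, Bool.and_eq_true, beq_iff_eq, ih]
          constructor
          · rintro (⟨hc, hd⟩ | ⟨m, hm, hinf⟩)
            · refine ⟨d, by simpa using hd, ?_⟩
              subst hc
              exact List.IsPrefix.isInfix ⟨rest, rfl⟩
            · exact ⟨m, hm, hinf.trans (List.suffix_cons c (d :: rest)).isInfix⟩
          · rintro ⟨m, hm, hinf⟩
            rcases List.infix_cons_iff.mp hinf with hpre | hinf'
            · rcases List.cons_prefix_cons.mp hpre with ⟨hc, hpre'⟩
              rcases List.cons_prefix_cons.mp hpre' with ⟨hd, -⟩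
              exact Or.inl ⟨hc.symm, by simpa [← hd] using hm⟩
            · exact Or.inr ⟨m, hm, hinf'⟩

-- A's eleven indicator searches, read through .toList, are the same chain of
-- character-list searches over the eleven metacharacters (definitional).
theorem pvA_eq_any (p : String) :
    is_regex_pattern p = pvMetas.any (fun m => PySem.Chars.isIn ['\\', m] p.toList) := rfl

-- A fires exactly when some ['\\', m] with m a metacharacter is an infix of the character list.
theorem pvA_iff (p : String) :
    is_regex_pattern p = true ↔ ∃ m ∈ pvMetas, ['\\', m] <:+: p.toList := by
  rw [pvA_eq_any]
  simp only [List.any_eq_true, PySem.Chars.isIn_iff_infix]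

-- ===== VERDICT (by name: the statement is the Claim_ definition above) =====
theorem is_regex_pattern_spec : Claim_equal_is_regex_pattern := by
  intro pattern _
  unfold Spec_is_regex_pattern is_regex_pattern_alt
  have h := (pvA_iff pattern).trans (pvScan_iff pattern.toList).symm
  cases hA : is_regex_pattern pattern <;> cases hB : pvScan pattern.toList <;>
    simp_all
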